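-- pv_equiv track=rewrite | github.com/twzhuang/brackex | makeDrawNoSeeds.py | fillSmallBracket
-- ===== SOURCE A (Python) =====
-- def fillSmallBracket(oddIndex, evenIndex, smallerBracket, nonPullouts, players):
--     firstquadrant = [None]*int(smallerBracket/4)
--     secondquadrant = [None]*int(smallerBracket/4)
--     thirdquadrant = [None]*int(smallerBracket/4)
--     fourthquadrant = [None]*int(smallerBracket/4)
--
--     # when numNonPulloutsPlaced equals nonPullouts, we will start placing empty arrays in our bracket
--     numNonPulloutsPlaced = 0
--     count = 0
--     # we only increment j after we've placed someone in all 4 quadrants of our bracket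
--     i = 0
--     pulloutIndexes = []
--     for j in range(smallerBracket):
--         if (numNonPulloutsPlaced == nonPullouts):
--             if count == 0:
--                 thirdquadrant[oddIndex[i]] = []
--                 count = 1
--                 pulloutIndex = oddIndex[i] + int(smallerBracket/4) * 2
--             elif count == 1:
--                 secondquadrant[evenIndex[i]] = []
--                 count = 2
--                 pulloutIndex = evenIndex[i] + int(smallerBracket/4)
--             elif count == 2:
--                 fourthquadrant[evenIndex[i]] = []
--                 count = 3
--                 pulloutIndex = evenIndex[i] + int(smallerBracket/4) * 3
--             elif count == 3:
--                 firstquadrant[oddIndex[i]] = []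
--                 count = 0
--                 pulloutIndex = oddIndex[i]
--                 i += 1
--             pulloutIndexes.append(pulloutIndex)
--
--         else:
--             if count == 0:
--                 thirdquadrant[oddIndex[i]] = players[j]
--                 count = 1
--             elif count == 1:
--                 secondquadrant[evenIndex[i]] = players[j]
--                 count = 2
--             elif count == 2:
--                 fourthquadrant[evenIndex[i]] = players[j]
--                 count = 3
--             elif count == 3:
--                 firstquadrant[oddIndex[i]] = players[j]
--                 count = 0
--                 i += 1
--             numNonPulloutsPlaced += 1
--     draw = firstquadrant + secondquadrant + thirdquadrant + fourthquadrant
--     return [draw, pulloutIndexes]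
-- ===== SOURCE B (Python) =====
-- def _quadrant(idxs, r, smallerBracket, nonPullouts, players, q):
--     # quadrant written at steps j = 4*i + r: slot idxs[i] gets players[j]
--     # while j is below the non-pullout count, an empty entry afterwards
--     quad = [None] * q
--     for i in range((smallerBracket - r + 3) // 4):
--         j = 4 * i + r
--         quad[idxs[i]] = players[j] if j < nonPullouts else []
--     return quad
--
--
-- def fillSmallBracket(oddIndex, evenIndex, smallerBracket, nonPullouts, players):
--     q = int(smallerBracket / 4)
--     # build the draw quadrant by quadrant: first (steps 3 mod 4, odd slots),
--     # second (1 mod 4, even slots), third (0 mod 4, odd), fourth (2 mod 4, even)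
--     draw = (_quadrant(oddIndex, 3, smallerBracket, nonPullouts, players, q)
--             + _quadrant(evenIndex, 1, smallerBracket, nonPullouts, players, q)
--             + _quadrant(oddIndex, 0, smallerBracket, nonPullouts, players, q)
--             + _quadrant(evenIndex, 2, smallerBracket, nonPullouts, players, q))
--     pulloutIndexes = [(2 * q, q, 3 * q, 0)[j % 4]
--                       + (oddIndex[j // 4] if j % 4 in (0, 3) else evenIndex[j // 4])
--                       for j in range(smallerBracket) if nonPullouts <= j]
--     return [draw, pulloutIndexes]
-- ===== Notes on version B (the rewrite author's own statement) =====
-- stated objective: alternative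
-- what changed: Replaces A's single stateful step loop (count/i/numNonPulloutsPlaced driving four quadrant arrays) by quadrant-at-a-time construction: each quadrant is built independently by its own loop over its index list, and the pullout indexes by one comprehension over the pullout steps.
-- intended difference: On inputs with nonPullouts < 0 and a non-empty bracket, A's 'placed == nonPullouts' gate never fires so A fills every slot with a player and returns no pullout indexes; B treats a negative non-pullout count as zero players and marks every slot a pullout, the intended reading of the count. — e.g. on fillSmallBracket([0], [0], 4, -1, [["a"], ["b"], ["c"], ["d"]]): A returns ([some ["d"], some ["b"], some ["a"], some ["c"]], []), B returns ([some [], some [], some [], some []], [2, 1, 3, 0])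
import Mathlib
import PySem

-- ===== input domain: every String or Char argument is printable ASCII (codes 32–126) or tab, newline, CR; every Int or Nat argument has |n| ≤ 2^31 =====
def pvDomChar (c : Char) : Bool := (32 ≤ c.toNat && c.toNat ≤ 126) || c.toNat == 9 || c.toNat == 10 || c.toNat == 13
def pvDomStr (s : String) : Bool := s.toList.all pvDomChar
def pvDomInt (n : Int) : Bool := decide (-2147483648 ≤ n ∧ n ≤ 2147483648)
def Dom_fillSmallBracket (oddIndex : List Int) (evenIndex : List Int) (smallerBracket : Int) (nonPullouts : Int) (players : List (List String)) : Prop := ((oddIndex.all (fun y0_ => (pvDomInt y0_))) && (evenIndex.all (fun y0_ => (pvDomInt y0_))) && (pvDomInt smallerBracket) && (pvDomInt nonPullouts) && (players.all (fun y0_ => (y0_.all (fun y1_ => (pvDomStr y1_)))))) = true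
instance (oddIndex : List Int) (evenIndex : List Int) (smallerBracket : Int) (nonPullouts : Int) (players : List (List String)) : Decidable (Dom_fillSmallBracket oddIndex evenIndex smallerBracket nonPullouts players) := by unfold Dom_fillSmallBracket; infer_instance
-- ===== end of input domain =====

-- B builds the draw quadrant by quadrant (one independent loop per quadrant over its index
-- list, plus one comprehension for the pullout indexes) instead of A's single stateful
-- step loop; on negative nonPullouts B intentionally marks every slot a pullout (see D_).

-- ===== PORT A =====
-- loop state of A: the four quadrant lists, numNonPulloutsPlaced, count, i, pulloutIndexes
structure PvStA where
  f1 : List (Option (List String))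
  f2 : List (Option (List String))
  f3 : List (Option (List String))
  f4 : List (Option (List String))
  placed : Int
  count : Int
  i : Int
  pulls : List Int

def pvStepA (oddIndex evenIndex : List Int) (players : List (List String)) (q nonPullouts : Int)
    (st : PvStA) (j : Nat) : PvStA :=
  if st.placed = nonPullouts then
    if st.count = 0 then
      { st with f3 := PySem.List.pySetD st.f3 (PySem.List.pyGetD oddIndex st.i 0) (some []),
                count := 1,
                pulls := st.pulls ++ [PySem.List.pyGetD oddIndex st.i 0 + q * 2] }
    else if st.count = 1 then
      { st with f2 := PySem.List.pySetD st.f2 (PySem.List.pyGetD evenIndex st.i 0) (some []),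
                count := 2,
                pulls := st.pulls ++ [PySem.List.pyGetD evenIndex st.i 0 + q] }
    else if st.count = 2 then
      { st with f4 := PySem.List.pySetD st.f4 (PySem.List.pyGetD evenIndex st.i 0) (some []),
                count := 3,
                pulls := st.pulls ++ [PySem.List.pyGetD evenIndex st.i 0 + q * 3] }
    else if st.count = 3 then
      { st with f1 := PySem.List.pySetD st.f1 (PySem.List.pyGetD oddIndex st.i 0) (some []),
                count := 0, i := st.i + 1,
                pulls := st.pulls ++ [PySem.List.pyGetD oddIndex st.i 0] }
    else st  -- unreachable: count is always 0,1,2 or 3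
  else
    if st.count = 0 then
      { st with f3 := PySem.List.pySetD st.f3 (PySem.List.pyGetD oddIndex st.i 0)
                        (some (PySem.List.pyGetD players (j : Int) [])),
                count := 1, placed := st.placed + 1 }
    else if st.count = 1 then
      { st with f2 := PySem.List.pySetD st.f2 (PySem.List.pyGetD evenIndex st.i 0)
                        (some (PySem.List.pyGetD players (j : Int) [])),
                count := 2, placed := st.placed + 1 }
    else if st.count = 2 then
      { st with f4 := PySem.List.pySetD st.f4 (PySem.List.pyGetD evenIndex st.i 0)
                        (some (PySem.List.pyGetD players (j : Int) [])),
                count := 3, placed := st.placed + 1 }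
    else if st.count = 3 then
      { st with f1 := PySem.List.pySetD st.f1 (PySem.List.pyGetD oddIndex st.i 0)
                        (some (PySem.List.pyGetD players (j : Int) [])),
                count := 0, i := st.i + 1, placed := st.placed + 1 }
    else { st with placed := st.placed + 1 }  -- unreachable: count is always 0,1,2 or 3

def fillSmallBracket (oddIndex : List Int) (evenIndex : List Int) (smallerBracket : Int) (nonPullouts : Int) (players : List (List String)) : List (Option (List String)) × List Int :=
  let q : Int := PySem.Int.truncdiv smallerBracket 4   -- int(smallerBracket/4), exact for |n| ≤ 2^31
  let s := (List.range smallerBracket.toNat).foldl (pvStepA oddIndex evenIndex players q nonPullouts)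
    { f1 := List.replicate q.toNat none, f2 := List.replicate q.toNat none,
      f3 := List.replicate q.toNat none, f4 := List.replicate q.toNat none,
      placed := 0, count := 0, i := 0, pulls := [] }
  (s.f1 ++ s.f2 ++ s.f3 ++ s.f4, s.pulls)

-- ===== PORT B =====
-- _quadrant: the quadrant written at steps j = 4*i + r (slot idxs[i] gets players[j]
-- while j is below the non-pullout count, an empty entry afterwards)
def pvQuadrant (idxs : List Int) (r : Int) (smallerBracket : Int) (nonPullouts : Int)
    (players : List (List String)) (q : Int) : List (Option (List String)) :=
  (List.range (PySem.Int.floordiv (smallerBracket - r + 3) 4).toNat).foldl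
    (fun quad (i : Nat) =>
      PySem.List.pySetD quad (PySem.List.pyGetD idxs (i : Int) 0)
        (if 4 * (i : Int) + r < nonPullouts
         then some (PySem.List.pyGetD players (4 * (i : Int) + r) [])
         else some []))
    (List.replicate q.toNat none)

def fillSmallBracket_alt (oddIndex : List Int) (evenIndex : List Int) (smallerBracket : Int) (nonPullouts : Int) (players : List (List String)) : List (Option (List String)) × List Int :=
  let q : Int := PySem.Int.truncdiv smallerBracket 4
  let draw := pvQuadrant oddIndex 3 smallerBracket nonPullouts players q
    ++ pvQuadrant evenIndex 1 smallerBracket nonPullouts players q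
    ++ pvQuadrant oddIndex 0 smallerBracket nonPullouts players q
    ++ pvQuadrant evenIndex 2 smallerBracket nonPullouts players q
  let pulloutIndexes := ((PySem.List.pyRange 0 smallerBracket 1).filter
      (fun j => decide (nonPullouts ≤ j))).map
    (fun j =>
      (if PySem.Int.mod j 4 = 0 then 2 * q
       else if PySem.Int.mod j 4 = 1 then q
       else if PySem.Int.mod j 4 = 2 then 3 * q
       else 0)
      + (if PySem.Int.mod j 4 = 0 ∨ PySem.Int.mod j 4 = 3
         then PySem.List.pyGetD oddIndex (PySem.Int.floordiv j 4) 0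
         else PySem.List.pyGetD evenIndex (PySem.Int.floordiv j 4) 0))
  (draw, pulloutIndexes)

-- ===== PRECONDITION & SPEC =====
-- Pre_ is exactly the set of inputs where the Python A returns: when smallerBracket > 0 the loop
-- indexes players[j] for every player-phase step, oddIndex/evenIndex up to the number of
-- full/partial cycles, and every used quadrant index must lie in [-q, q) (IndexError otherwise).
def Pre_fillSmallBracket (oddIndex : List Int) (evenIndex : List Int) (smallerBracket : Int) (nonPullouts : Int) (players : List (List String)) : Prop :=
  smallerBracket ≤ 0 ∨
  (let n := smallerBracket.toNat
   let q : Int := PySem.Int.truncdiv smallerBracket 4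
   let m : Int := if 0 ≤ nonPullouts ∧ nonPullouts ≤ smallerBracket then nonPullouts else smallerBracket
   m ≤ (players.length : Int) ∧
   (n + 3) / 4 ≤ oddIndex.length ∧ (n + 2) / 4 ≤ evenIndex.length ∧
   (∀ x ∈ oddIndex.take ((n + 3) / 4), -q ≤ x ∧ x < q) ∧
   (∀ x ∈ evenIndex.take ((n + 2) / 4), -q ≤ x ∧ x < q))
instance (oddIndex : List Int) (evenIndex : List Int) (smallerBracket : Int) (nonPullouts : Int) (players : List (List String)) : Decidable (Pre_fillSmallBracket oddIndex evenIndex smallerBracket nonPullouts players) := by unfold Pre_fillSmallBracket; infer_instance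

def pvWitness_fillSmallBracket : List Int × List Int × Int × Int × List (List String) :=
  ([0], [0], 4, 2, [["a"], ["b"]])

-- On inputs with nonPullouts < 0 and a non-empty bracket, A's 'placed == nonPullouts' gate
-- never fires so A fills every slot with a player and returns no pullout indexes; B treats a
-- negative non-pullout count as zero players and marks every slot a pullout, the intended
-- reading of the count.
def D_fillSmallBracket (oddIndex : List Int) (evenIndex : List Int) (smallerBracket : Int) (nonPullouts : Int) (players : List (List String)) : Prop :=
  nonPullouts < 0 ∧ 1 ≤ smallerBracket
instance (oddIndex : List Int) (evenIndex : List Int) (smallerBracket : Int) (nonPullouts : Int) (players : List (List String)) : Decidable (D_fillSmallBracket oddIndex evenIndex smallerBracket nonPullouts players) := by unfold D_fillSmallBracket; infer_instance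

def Spec_fillSmallBracket (oddIndex : List Int) (evenIndex : List Int) (smallerBracket : Int) (nonPullouts : Int) (players : List (List String)) (out : List (Option (List String)) × List Int) : Prop := ¬ D_fillSmallBracket oddIndex evenIndex smallerBracket nonPullouts players → out = fillSmallBracket_alt oddIndex evenIndex smallerBracket nonPullouts players
instance (oddIndex : List Int) (evenIndex : List Int) (smallerBracket : Int) (nonPullouts : Int) (players : List (List String)) (out : List (Option (List String)) × List Int) : Decidable (Spec_fillSmallBracket oddIndex evenIndex smallerBracket nonPullouts players out) := by unfold Spec_fillSmallBracket; infer_instance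

def pvDiffWitness_fillSmallBracket : List Int × List Int × Int × Int × List (List String) :=
  ([0], [0], 4, -1, [["a"], ["b"], ["c"], ["d"]])

def pvDiffWitnessOut_fillSmallBracket : (List (Option (List String)) × List Int) × (List (Option (List String)) × List Int) :=
  (([some ["d"], some ["b"], some ["a"], some ["c"]], []),
   ([some [], some [], some [], some []], [2, 1, 3, 0]))

-- ===== CLAIM (what is proved, stated in full; the proofs are below) =====
def Claim_unchanged_fillSmallBracket : Prop := ∀ (oddIndex : List Int) (evenIndex : List Int) (smallerBracket : Int) (nonPullouts : Int) (players : List (List String)), Dom_fillSmallBracket oddIndex evenIndex smallerBracket nonPullouts players → Pre_fillSmallBracket oddIndex evenIndex smallerBracket nonPullouts players → Spec_fillSmallBracket oddIndex evenIndex smallerBracket nonPullouts players (fillSmallBracket oddIndex evenIndex smallerBracket nonPullouts players)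
def Claim_changed_fillSmallBracket : Prop := Dom_fillSmallBracket (pvDiffWitness_fillSmallBracket.1) (pvDiffWitness_fillSmallBracket.2.1) (pvDiffWitness_fillSmallBracket.2.2.1) (pvDiffWitness_fillSmallBracket.2.2.2.1) (pvDiffWitness_fillSmallBracket.2.2.2.2) ∧ Pre_fillSmallBracket (pvDiffWitness_fillSmallBracket.1) (pvDiffWitness_fillSmallBracket.2.1) (pvDiffWitness_fillSmallBracket.2.2.1) (pvDiffWitness_fillSmallBracket.2.2.2.1) (pvDiffWitness_fillSmallBracket.2.2.2.2) ∧ D_fillSmallBracket (pvDiffWitness_fillSmallBracket.1) (pvDiffWitness_fillSmallBracket.2.1) (pvDiffWitness_fillSmallBracket.2.2.1) (pvDiffWitness_fillSmallBracket.2.2.2.1) (pvDiffWitness_fillSmallBracket.2.2.2.2) ∧ fillSmallBracket (pvDiffWitness_fillSmallBracket.1) (pvDiffWitness_fillSmallBracket.2.1) (pvDiffWitness_fillSmallBracket.2.2.1) (pvDiffWitness_fillSmallBracket.2.2.2.1) (pvDiffWitness_fillSmallBracket.2.2.2.2) = pvDiffWitnessOut_fillSmallBracket.1 ∧ fillSmallBracket_alt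 (pvDiffWitness_fillSmallBracket.1) (pvDiffWitness_fillSmallBracket.2.1) (pvDiffWitness_fillSmallBracket.2.2.1) (pvDiffWitness_fillSmallBracket.2.2.2.1) (pvDiffWitness_fillSmallBracket.2.2.2.2) = pvDiffWitnessOut_fillSmallBracket.2 ∧ pvDiffWitnessOut_fillSmallBracket.1 ≠ pvDiffWitnessOut_fillSmallBracket.2
def Claim_exact_fillSmallBracket : Prop := ∀ (oddIndex : List Int) (evenIndex : List Int) (smallerBracket : Int) (nonPullouts : Int) (players : List (List String)), Dom_fillSmallBracket oddIndex evenIndex smallerBracket nonPullouts players → Pre_fillSmallBracket oddIndex evenIndex smallerBracket nonPullouts players → D_fillSmallBracket oddIndex evenIndex smallerBracket nonPullouts players → fillSmallBracket oddIndex evenIndex smallerBracket nonPullouts players ≠ fillSmallBracket_alt oddIndex evenIndex smallerBracket nonPullouts players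

-- ===== LEMMAS AND PROOFS =====

-- value placed at step j (a player during the first mN steps, [] afterwards)
def pvVal (players : List (List String)) (mN : Nat) (j : Nat) : Option (List String) :=
  if j < mN then some (PySem.List.pyGetD players (j : Int) []) else some []

-- base offset of the quadrant written at step j (r = j % 4): third, second, fourth, first
def pvBase (q : Int) (r : Nat) : Int :=
  if r = 0 then 2 * q else if r = 1 then q else if r = 2 then 3 * q else 0

-- the in-quadrant index used at step j
def pvIdx (oddIndex evenIndex : List Int) (j : Nat) : Int :=
  if j % 4 = 0 ∨ j % 4 = 3 then PySem.List.pyGetD oddIndex ((j / 4 : Nat) : Int) 0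
  else PySem.List.pyGetD evenIndex ((j / 4 : Nat) : Int) 0

-- pullout index recorded at step j
def pvPull (oddIndex evenIndex : List Int) (q : Int) (j : Nat) : Int :=
  pvBase q (j % 4) + pvIdx oddIndex evenIndex j

-- content of the residue-r quadrant after the first k steps
def pvQuadSpec (idxs : List Int) (players : List (List String)) (mN qn r k : Nat) :
    List (Option (List String)) :=
  ((List.range k).filter (fun j => decide (j % 4 = r))).foldl
    (fun quad j => PySem.List.pySetD quad (PySem.List.pyGetD idxs ((j / 4 : Nat) : Int) 0)
      (pvVal players mN j))
    (List.replicate qn none)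

lemma pvQuadSpec_succ_eq (idxs : List Int) (players : List (List String)) (mN qn r k : Nat)
    (h : k % 4 = r) :
    pvQuadSpec idxs players mN qn r (k + 1)
      = PySem.List.pySetD (pvQuadSpec idxs players mN qn r k)
          (PySem.List.pyGetD idxs ((k / 4 : Nat) : Int) 0) (pvVal players mN k) := by
  unfold pvQuadSpec
  rw [List.range_succ, List.filter_append]
  simp [h]

lemma pvQuadSpec_succ_ne (idxs : List Int) (players : List (List String)) (mN qn r k : Nat)
    (h : ¬ k % 4 = r) :
    pvQuadSpec idxs players mN qn r (k + 1) = pvQuadSpec idxs players mN qn r k := by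
  unfold pvQuadSpec
  rw [List.range_succ, List.filter_append]
  simp [h]

lemma pv_truncdiv_natCast (n : Nat) : PySem.Int.truncdiv (n : Int) 4 = ((n / 4 : Nat) : Int) := by
  show (n : Int).tdiv 4 = ((n / 4 : Nat) : Int)
  rw [Int.tdiv_eq_ediv, if_pos (Or.inl (by omega : (0:Int) ≤ (n : Int)))]
  omega

lemma pv_truncdiv_nonpos (sb : Int) (h : sb ≤ 0) : PySem.Int.truncdiv sb 4 ≤ 0 := by
  show sb.tdiv 4 ≤ 0
  rw [Int.tdiv_eq_ediv]
  rcases Classical.em ((0:Int) ≤ sb ∨ (4:Int) ∣ sb) with hc | hc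
  · rw [if_pos hc]
    rcases hc with hc | hc <;> omega
  · rw [if_neg hc, show ((4:Int)).sign = 1 from rfl]
    have h1 : sb < 0 := by by_contra h0; exact hc (Or.inl (by omega))
    have h2 : ¬ (4:Int) ∣ sb := fun h0 => hc (Or.inr h0)
    omega

-- the steps of residue r below n, listed as 4*i + r
lemma pv_filter_range_mod (r n : Nat) (hr : r < 4) :
    (List.range n).filter (fun j => decide (j % 4 = r))
      = (List.range ((n + 3 - r) / 4)).map (fun i => 4 * i + r) := by
  induction n with
  | zero =>
    have h0 : (0 + 3 - r) / 4 = 0 := by omega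
    simp [h0]
  | succ n ih =>
    rw [List.range_succ, List.filter_append, ih]
    by_cases h : n % 4 = r
    · have hc : (n + 1 + 3 - r) / 4 = (n + 3 - r) / 4 + 1 := by omega
      have hlast : 4 * ((n + 3 - r) / 4) + r = n := by omega
      rw [hc, List.range_succ, List.map_append]
      simp [h, hlast]
    · have hc : (n + 1 + 3 - r) / 4 = (n + 3 - r) / 4 := by omega
      rw [hc]
      simp [h]

-- B's per-quadrant loop computes the residue-r quadrant content
lemma pv_quadB_eq (idxs : List Int) (players : List (List String)) (np q : Int) (n r : Nat)
    (hr : r < 4) (hnp : 0 ≤ np) :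
    pvQuadrant idxs (r : Int) (n : Int) np players q
      = pvQuadSpec idxs players (min np.toNat n) q.toNat r n := by
  unfold pvQuadrant
  have h1 : ((n : Int) - (r : Int) + 3) = ((n + 3 - r : Nat) : Int) := by omega
  have hcount : (PySem.Int.floordiv ((n : Int) - (r : Int) + 3) 4).toNat = (n + 3 - r) / 4 := by
    rw [h1, show ((4 : Int)) = ((4 : Nat) : Int) from rfl, PySem.Int.floordiv_natCast,
        Int.toNat_natCast]
  rw [hcount]
  unfold pvQuadSpec
  rw [pv_filter_range_mod r n hr, List.foldl_map]
  apply PySem.List.foldl_congr_mem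
  intro quad i hi
  rw [List.mem_range] at hi
  have hjn : 4 * i + r < n := by omega
  have hdiv : (4 * i + r) / 4 = i := by omega
  have hcast : ((4 * i + r : Nat) : Int) = 4 * (i : Int) + (r : Int) := by omega
  have hcond : ((4 * (i : Int) + (r : Int)) < np) ↔ (4 * i + r < min np.toNat n) := by omega
  unfold pvVal
  rw [hdiv, ← hcast]
  by_cases hlt : 4 * i + r < min np.toNat n
  · rw [if_pos hlt, if_pos (show ((4 * i + r : Nat) : Int) < np from by omega)]
  · rw [if_neg hlt, if_neg (show ¬ ((4 * i + r : Nat) : Int) < np from by omega)]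

-- the steps at or beyond m, in step order
lemma pv_filter_range_ge (m n : Nat) :
    (List.range n).filter (fun k => decide (m ≤ k)) = List.range' m (n - m) := by
  induction n with
  | zero => simp
  | succ n ih =>
    rw [List.range_succ, List.filter_append, ih]
    by_cases h : m ≤ n
    · have hc : n + 1 - m = (n - m) + 1 := by omega
      rw [hc, List.range'_concat, show m + 1 * (n - m) = n from by omega]
      simp [h]
    · rw [show n + 1 - m = 0 from by omega, show n - m = 0 from by omega]
      simp [h]

-- B's pullout-index expression at a natural step equals pvPull
lemma pv_pull_cast (oddIndex evenIndex : List Int) (q : Int) (k : Nat) :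
    ((if PySem.Int.mod ((k : Nat) : Int) 4 = 0 then 2 * q
      else if PySem.Int.mod ((k : Nat) : Int) 4 = 1 then q
      else if PySem.Int.mod ((k : Nat) : Int) 4 = 2 then 3 * q
      else 0)
     + (if PySem.Int.mod ((k : Nat) : Int) 4 = 0 ∨ PySem.Int.mod ((k : Nat) : Int) 4 = 3
        then PySem.List.pyGetD oddIndex (PySem.Int.floordiv ((k : Nat) : Int) 4) 0
        else PySem.List.pyGetD evenIndex (PySem.Int.floordiv ((k : Nat) : Int) 4) 0))
    = pvPull oddIndex evenIndex q k := by
  have hmod : PySem.Int.mod ((k : Nat) : Int) 4 = ((k % 4 : Nat) : Int) := by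
    rw [show ((4 : Int)) = ((4 : Nat) : Int) from rfl, PySem.Int.mod_natCast]
  have hdiv : PySem.Int.floordiv ((k : Nat) : Int) 4 = ((k / 4 : Nat) : Int) := by
    rw [show ((4 : Int)) = ((4 : Nat) : Int) from rfl, PySem.Int.floordiv_natCast]
  rw [hmod, hdiv]
  unfold pvPull pvBase pvIdx
  have h4 : k % 4 = 0 ∨ k % 4 = 1 ∨ k % 4 = 2 ∨ k % 4 = 3 := by omega
  rcases h4 with h | h | h | h <;> simp [h]

-- main invariant of A's loop: after k steps the state holds the four residue quadrants,
-- the phase counters, and the pullout indexes of the steps in [mN, k)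
lemma pv_invA (oddIndex evenIndex : List Int) (players : List (List String)) (np q : Int)
    (n mN : Nat) (hmN : mN ≤ n)
    (hnp1 : ∀ k : Nat, k < mN → ((k : Int) ≠ np))
    (hnp2 : mN < n → ((mN : Int) = np)) :
    ∀ k, k ≤ n →
      (List.range k).foldl (pvStepA oddIndex evenIndex players q np)
        { f1 := List.replicate q.toNat none, f2 := List.replicate q.toNat none,
          f3 := List.replicate q.toNat none, f4 := List.replicate q.toNat none,
          placed := 0, count := 0, i := 0, pulls := [] } =
      { f1 := pvQuadSpec oddIndex players mN q.toNat 3 k,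
        f2 := pvQuadSpec evenIndex players mN q.toNat 1 k,
        f3 := pvQuadSpec oddIndex players mN q.toNat 0 k,
        f4 := pvQuadSpec evenIndex players mN q.toNat 2 k,
        placed := ((min k mN : Nat) : Int),
        count := ((k % 4 : Nat) : Int),
        i := ((k / 4 : Nat) : Int),
        pulls := (List.range' mN (k - mN)).map (pvPull oddIndex evenIndex q) } := by
  intro k
  induction k with
  | zero =>
    intro _
    simp [pvQuadSpec]
  | succ k ih =>
    intro hk1
    rw [List.range_succ, List.foldl_append, ih (by omega)]
    simp only [List.foldl_cons, List.foldl_nil]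
    have hkn : k < n := by omega
    have h4 : k % 4 = 0 ∨ k % 4 = 1 ∨ k % 4 = 2 ∨ k % 4 = 3 := by omega
    rcases Nat.lt_or_ge k mN with hph | hph
    · -- player phase: placed = k ≠ nonPullouts
      have hne : ¬ (((min k mN : Nat) : Int) = np) := by
        rw [show min k mN = k from by omega]; exact hnp1 k hph
      have hval : pvVal players mN k = some (PySem.List.pyGetD players ((k : Nat) : Int) []) := by
        unfold pvVal; rw [if_pos hph]
      have hpulls : k + 1 - mN = k - mN := by omega
      rcases h4 with h | h | h | h
      · -- count 0: third quadrant
        unfold pvStepA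
        rw [if_neg hne, if_pos (by simp [h])]
        simp only [PvStA.mk.injEq]
        refine ⟨(pvQuadSpec_succ_ne _ _ _ _ _ _ (by omega)).symm,
                (pvQuadSpec_succ_ne _ _ _ _ _ _ (by omega)).symm,
                ?_, (pvQuadSpec_succ_ne _ _ _ _ _ _ (by omega)).symm,
                by omega, by omega, by omega, by rw [hpulls]⟩
        rw [pvQuadSpec_succ_eq _ _ _ _ _ _ h, hval]
      · -- count 1: second quadrant
        unfold pvStepA
        rw [if_neg hne, if_neg (by simp [h]), if_pos (by simp [h])]
        simp only [PvStA.mk.injEq]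
        refine ⟨(pvQuadSpec_succ_ne _ _ _ _ _ _ (by omega)).symm,
                ?_, (pvQuadSpec_succ_ne _ _ _ _ _ _ (by omega)).symm,
                (pvQuadSpec_succ_ne _ _ _ _ _ _ (by omega)).symm,
                by omega, by omega, by omega, by rw [hpulls]⟩
        rw [pvQuadSpec_succ_eq _ _ _ _ _ _ h, hval]
      · -- count 2: fourth quadrant
        unfold pvStepA
        rw [if_neg hne, if_neg (by simp [h]), if_neg (by simp [h]), if_pos (by simp [h])]
        simp only [PvStA.mk.injEq]
        refine ⟨(pvQuadSpec_succ_ne _ _ _ _ _ _ (by omega)).symm,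
                (pvQuadSpec_succ_ne _ _ _ _ _ _ (by omega)).symm,
                (pvQuadSpec_succ_ne _ _ _ _ _ _ (by omega)).symm, ?_,
                by omega, by omega, by omega, by rw [hpulls]⟩
        rw [pvQuadSpec_succ_eq _ _ _ _ _ _ h, hval]
      · -- count 3: first quadrant
        unfold pvStepA
        rw [if_neg hne, if_neg (by simp [h]), if_neg (by simp [h]), if_neg (by simp [h]),
            if_pos (by simp [h])]
        simp only [PvStA.mk.injEq]
        refine ⟨?_, (pvQuadSpec_succ_ne _ _ _ _ _ _ (by omega)).symm,
                (pvQuadSpec_succ_ne _ _ _ _ _ _ (by omega)).symm,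
                (pvQuadSpec_succ_ne _ _ _ _ _ _ (by omega)).symm,
                by omega, by omega, by omega, by rw [hpulls]⟩
        rw [pvQuadSpec_succ_eq _ _ _ _ _ _ h, hval]
    · -- pullout phase: placed = mN = nonPullouts
      have heqnp : (((min k mN : Nat) : Int) = np) := by
        rw [show min k mN = mN from by omega]; exact hnp2 (by omega)
      have hval : pvVal players mN k = some [] := by
        unfold pvVal; rw [if_neg (by omega)]
      have hpulls : (List.range' mN (k + 1 - mN)).map (pvPull oddIndex evenIndex q)
          = (List.range' mN (k - mN)).map (pvPull oddIndex evenIndex q)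
            ++ [pvPull oddIndex evenIndex q k] := by
        rw [show k + 1 - mN = (k - mN) + 1 from by omega, List.range'_concat, List.map_append,
            show mN + 1 * (k - mN) = k from by omega, List.map_singleton]
      rcases h4 with h | h | h | h
      · have hpl : pvPull oddIndex evenIndex q k
            = PySem.List.pyGetD oddIndex ((k / 4 : Nat) : Int) 0 + q * 2 := by
          unfold pvPull pvBase pvIdx; simp [h]; ring
        unfold pvStepA
        rw [if_pos heqnp, if_pos (by simp [h])]
        simp only [PvStA.mk.injEq]
        refine ⟨(pvQuadSpec_succ_ne _ _ _ _ _ _ (by omega)).symm,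
                (pvQuadSpec_succ_ne _ _ _ _ _ _ (by omega)).symm,
                ?_, (pvQuadSpec_succ_ne _ _ _ _ _ _ (by omega)).symm,
                by omega, by omega, by omega, by rw [hpulls, hpl]⟩
        rw [pvQuadSpec_succ_eq _ _ _ _ _ _ h, hval]
      · have hpl : pvPull oddIndex evenIndex q k
            = PySem.List.pyGetD evenIndex ((k / 4 : Nat) : Int) 0 + q := by
          unfold pvPull pvBase pvIdx; simp [h]; ring
        unfold pvStepA
        rw [if_pos heqnp, if_neg (by simp [h]), if_pos (by simp [h])]
        simp only [PvStA.mk.injEq]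
        refine ⟨(pvQuadSpec_succ_ne _ _ _ _ _ _ (by omega)).symm,
                ?_, (pvQuadSpec_succ_ne _ _ _ _ _ _ (by omega)).symm,
                (pvQuadSpec_succ_ne _ _ _ _ _ _ (by omega)).symm,
                by omega, by omega, by omega, by rw [hpulls, hpl]⟩
        rw [pvQuadSpec_succ_eq _ _ _ _ _ _ h, hval]
      · have hpl : pvPull oddIndex evenIndex q k
            = PySem.List.pyGetD evenIndex ((k / 4 : Nat) : Int) 0 + q * 3 := by
          unfold pvPull pvBase pvIdx; simp [h]; ring
        unfold pvStepA
        rw [if_pos heqnp, if_neg (by simp [h]), if_neg (by simp [h]), if_pos (by simp [h])]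
        simp only [PvStA.mk.injEq]
        refine ⟨(pvQuadSpec_succ_ne _ _ _ _ _ _ (by omega)).symm,
                (pvQuadSpec_succ_ne _ _ _ _ _ _ (by omega)).symm,
                (pvQuadSpec_succ_ne _ _ _ _ _ _ (by omega)).symm, ?_,
                by omega, by omega, by omega, by rw [hpulls, hpl]⟩
        rw [pvQuadSpec_succ_eq _ _ _ _ _ _ h, hval]
      · have hpl : pvPull oddIndex evenIndex q k
            = PySem.List.pyGetD oddIndex ((k / 4 : Nat) : Int) 0 := by
          unfold pvPull pvBase pvIdx; simp [h]
        unfold pvStepA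
        rw [if_pos heqnp, if_neg (by simp [h]), if_neg (by simp [h]), if_neg (by simp [h]),
            if_pos (by simp [h])]
        simp only [PvStA.mk.injEq]
        refine ⟨?_, (pvQuadSpec_succ_ne _ _ _ _ _ _ (by omega)).symm,
                (pvQuadSpec_succ_ne _ _ _ _ _ _ (by omega)).symm,
                (pvQuadSpec_succ_ne _ _ _ _ _ _ (by omega)).symm,
                by omega, by omega, by omega, by rw [hpulls, hpl]⟩
        rw [pvQuadSpec_succ_eq _ _ _ _ _ _ h, hval]

-- B's pullout comprehension computes the pullout indexes of the steps in [mN, n)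
lemma pv_pulls_eq (oddIndex evenIndex : List Int) (np q : Int) (n : Nat) (hnp : 0 ≤ np) :
    ((PySem.List.pyRange 0 (n : Int) 1).filter (fun j => decide (np ≤ j))).map
      (fun j =>
        (if PySem.Int.mod j 4 = 0 then 2 * q
         else if PySem.Int.mod j 4 = 1 then q
         else if PySem.Int.mod j 4 = 2 then 3 * q
         else 0)
        + (if PySem.Int.mod j 4 = 0 ∨ PySem.Int.mod j 4 = 3
           then PySem.List.pyGetD oddIndex (PySem.Int.floordiv j 4) 0
           else PySem.List.pyGetD evenIndex (PySem.Int.floordiv j 4) 0))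
    = (List.range' (min np.toNat n) (n - min np.toNat n)).map (pvPull oddIndex evenIndex q) := by
  rw [PySem.List.pyRange_one, List.filter_map, List.map_map]
  have hn : ((n : Int) - 0).toNat = n := by omega
  rw [hn]
  have hfil : (List.range n).filter ((fun j => decide (np ≤ j)) ∘ (fun k => (0 : Int) + (k : Nat)))
      = (List.range n).filter (fun k => decide (min np.toNat n ≤ k)) := by
    apply List.filter_congr
    intro x hx
    rw [List.mem_range] at hx
    simp only [Function.comp]
    by_cases hc : min np.toNat n ≤ x
    · rw [decide_eq_true (by omega : np ≤ (0 : Int) + (x : Nat)), decide_eq_true hc]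
    · rw [decide_eq_false (by omega : ¬ np ≤ (0 : Int) + (x : Nat)), decide_eq_false hc]
  rw [hfil, pv_filter_range_ge]
  apply List.map_congr_left
  intro k _
  simp only [Function.comp_apply, zero_add]
  exact pv_pull_cast oddIndex evenIndex q k

-- ===== VERDICT (by name: the statement is the Claim_ definition above) =====
theorem fillSmallBracket_spec : Claim_unchanged_fillSmallBracket := by
  intro oddIndex evenIndex sb np players _ hPre hnD
  rcases le_or_gt sb 0 with hsb | hsb
  · -- empty bracket: both sides are ([], [])
    have hq : PySem.Int.truncdiv sb 4 ≤ 0 := pv_truncdiv_nonpos sb hsb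
    have hqn : (PySem.Int.truncdiv sb 4).toNat = 0 := by omega
    have hn : sb.toNat = 0 := by omega
    have hA : fillSmallBracket oddIndex evenIndex sb np players = ([], []) := by
      simp only [fillSmallBracket]
      rw [hn, hqn]
      simp
    have hcnt : ∀ r : Int, 0 ≤ r →
        (PySem.Int.floordiv (sb - r + 3) 4).toNat = 0 := by
      intro r hr
      have : PySem.Int.floordiv (sb - r + 3) 4 < 1 := by
        rw [PySem.Int.floordiv_lt_iff_lt_mul (by omega)]
        omega
      omega
    have hB : fillSmallBracket_alt oddIndex evenIndex sb np players = ([], []) := by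
      simp only [fillSmallBracket_alt, pvQuadrant]
      rw [hcnt 3 (by omega), hcnt 1 (by omega), hcnt 0 (by omega), hcnt 2 (by omega),
          hqn, PySem.List.pyRange_one_eq_nil hsb]
      simp
    rw [hA, hB]
  · -- non-empty bracket: nonPullouts ≥ 0 (¬ D_) and both sides are the quadrant contents
    have hnp : 0 ≤ np := by
      by_contra hlt
      exact hnD ⟨by omega, by omega⟩
    set n := sb.toNat with hndef
    have hsbn : sb = (n : Int) := by omega
    set mN := min np.toNat n with hmdef
    have hnp1 : ∀ k : Nat, k < mN → ((k : Int) ≠ np) := by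
      intro k hk
      have : k < np.toNat := by omega
      omega
    have hnp2 : mN < n → ((mN : Int) = np) := by
      intro h
      have : mN = np.toNat := by omega
      omega
    have hq : PySem.Int.truncdiv sb 4 = ((n / 4 : Nat) : Int) := by
      rw [hsbn]; exact pv_truncdiv_natCast n
    have hinv := pv_invA oddIndex evenIndex players np (PySem.Int.truncdiv sb 4) n mN
      (min_le_right _ _) hnp1 hnp2 n (le_refl n)
    have hA : fillSmallBracket oddIndex evenIndex sb np players
        = (pvQuadSpec oddIndex players mN (PySem.Int.truncdiv sb 4).toNat 3 n
            ++ pvQuadSpec evenIndex players mN (PySem.Int.truncdiv sb 4).toNat 1 n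
            ++ pvQuadSpec oddIndex players mN (PySem.Int.truncdiv sb 4).toNat 0 n
            ++ pvQuadSpec evenIndex players mN (PySem.Int.truncdiv sb 4).toNat 2 n,
           (List.range' mN (n - mN)).map (pvPull oddIndex evenIndex (PySem.Int.truncdiv sb 4))) := by
      simp only [fillSmallBracket]
      rw [show sb.toNat = n from rfl, hinv]
    have hB : fillSmallBracket_alt oddIndex evenIndex sb np players
        = (pvQuadSpec oddIndex players mN (PySem.Int.truncdiv sb 4).toNat 3 n
            ++ pvQuadSpec evenIndex players mN (PySem.Int.truncdiv sb 4).toNat 1 n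
            ++ pvQuadSpec oddIndex players mN (PySem.Int.truncdiv sb 4).toNat 0 n
            ++ pvQuadSpec evenIndex players mN (PySem.Int.truncdiv sb 4).toNat 2 n,
           (List.range' mN (n - mN)).map (pvPull oddIndex evenIndex (PySem.Int.truncdiv sb 4))) := by
      have hq3 := pv_quadB_eq oddIndex players np (PySem.Int.truncdiv sb 4) n 3 (by omega) hnp
      have hq1 := pv_quadB_eq evenIndex players np (PySem.Int.truncdiv sb 4) n 1 (by omega) hnp
      have hq0 := pv_quadB_eq oddIndex players np (PySem.Int.truncdiv sb 4) n 0 (by omega) hnp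
      have hq2 := pv_quadB_eq evenIndex players np (PySem.Int.truncdiv sb 4) n 2 (by omega) hnp
      have hp := pv_pulls_eq oddIndex evenIndex np (PySem.Int.truncdiv sb 4) n hnp
      simp only [Nat.cast_ofNat, Nat.cast_one, Nat.cast_zero] at hq3 hq1 hq0 hq2
      rw [← hsbn] at hq3 hq1 hq0 hq2 hp
      simp only [fillSmallBracket_alt]
      rw [hq3, hq1, hq0, hq2, hp]
    rw [hA, hB]

theorem fillSmallBracket_changed : Claim_changed_fillSmallBracket := by
  unfold Claim_changed_fillSmallBracket
  decide

theorem fillSmallBracket_tight : Claim_exact_fillSmallBracket := by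
  intro oddIndex evenIndex sb np players _ hPre hD
  obtain ⟨hnp, hsb⟩ := hD
  set n := sb.toNat with hndef
  have hsbn : sb = (n : Int) := by omega
  have hn1 : 1 ≤ n := by omega
  -- Pre_ forces a usable quadrant, hence q ≥ 1 and n ≥ 4
  rcases hPre with h | hPre
  · omega
  obtain ⟨_, hodd, _, hbnd, _⟩ := hPre
  have hq : PySem.Int.truncdiv sb 4 = ((n / 4 : Nat) : Int) := by
    rw [hsbn]; exact pv_truncdiv_natCast n
  have htake : 1 ≤ (n + 3) / 4 := by omega
  have hne : oddIndex ≠ [] := by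
    intro h0
    rw [h0] at hodd
    simp at hodd
    omega
  obtain ⟨x, hx⟩ : ∃ x, x ∈ oddIndex.take ((sb.toNat + 3) / 4) := by
    rcases oddIndex with _ | ⟨y, ys⟩
    · exact absurd rfl hne
    · exact ⟨y, by rw [List.take_cons (by omega)]; exact List.mem_cons_self⟩
  have hxb := hbnd x hx
  have hq1 : (1 : Int) ≤ PySem.Int.truncdiv sb 4 := by omega
  have hn4 : 4 ≤ n := by
    rw [hq] at hq1
    omega
  -- A records no pullout indexes (its gate never fires)…
  have hnp1 : ∀ k : Nat, k < n → ((k : Int) ≠ np) := by intro k _; omega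
  have hinv := pv_invA oddIndex evenIndex players np (PySem.Int.truncdiv sb 4) n n
    (le_refl n) hnp1 (by omega) n (le_refl n)
  have hA : fillSmallBracket oddIndex evenIndex sb np players
      = (pvQuadSpec oddIndex players n (PySem.Int.truncdiv sb 4).toNat 3 n
          ++ pvQuadSpec evenIndex players n (PySem.Int.truncdiv sb 4).toNat 1 n
          ++ pvQuadSpec oddIndex players n (PySem.Int.truncdiv sb 4).toNat 0 n
          ++ pvQuadSpec evenIndex players n (PySem.Int.truncdiv sb 4).toNat 2 n,
         (List.range' n (n - n)).map (pvPull oddIndex evenIndex (PySem.Int.truncdiv sb 4))) := by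
    simp only [fillSmallBracket]
    rw [show sb.toNat = n from rfl, hinv]
  have hA2 : (fillSmallBracket oddIndex evenIndex sb np players).2 = [] := by
    rw [hA]
    simp
  -- …while B records one for every step
  have hB2 : (fillSmallBracket_alt oddIndex evenIndex sb np players).2 ≠ [] := by
    simp only [fillSmallBracket_alt]
    rw [PySem.List.pyRange_one_cons (by omega : (0 : Int) < sb),
        List.filter_cons_of_pos (by rw [decide_eq_true_iff]; omega)]
    simp
  intro h
  apply hB2
  rw [← h]
  exact hA2
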